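-- pv_equiv track=rewrite | github.com/walkingzzzy/AIOS | aios/image/mkosi.extra/usr/libexec/aios-shell/components/recovery-surface/panel.py | latest_recovery_id
-- ===== SOURCE A (Python) =====
-- def latest_recovery_id(recovery_points: list[str]) -> str | None:
--     for value in reversed(recovery_points):
--         name = value.rsplit("/", 1)[-1].strip()
--         if name.endswith(".json"):
--             name = name[:-5]
--         if name:
--             return name
--     return None
-- ===== SOURCE B (Python) =====
-- def latest_recovery_id(recovery_points: list[str]) -> str | None:
--     result = None
--     for value in recovery_points:
--         name = value[value.rfind("/") + 1:].strip()
--         if name.endswith(".json"):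
--             name = name[:-len(".json")]
--         if name:
--             result = name
--     return result
-- ===== Notes on version B (the rewrite author's own statement) =====
-- stated objective: alternative
-- what changed: Replaced the reversed scan with early return by a single forward pass keeping a last-wins accumulator, and computed the basename by slicing after rfind('/') instead of rsplit('/', 1)[-1].
import Mathlib
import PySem

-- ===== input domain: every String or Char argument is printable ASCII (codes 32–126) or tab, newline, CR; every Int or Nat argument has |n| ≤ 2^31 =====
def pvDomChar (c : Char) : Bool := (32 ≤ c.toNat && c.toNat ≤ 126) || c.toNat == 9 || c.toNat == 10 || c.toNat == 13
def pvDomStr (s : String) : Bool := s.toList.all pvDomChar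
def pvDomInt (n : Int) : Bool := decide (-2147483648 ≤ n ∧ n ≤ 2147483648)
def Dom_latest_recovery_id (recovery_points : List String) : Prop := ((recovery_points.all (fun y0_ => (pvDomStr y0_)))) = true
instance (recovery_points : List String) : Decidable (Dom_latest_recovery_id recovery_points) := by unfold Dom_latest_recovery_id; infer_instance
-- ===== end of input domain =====

-- B replaces A's reversed scan with early return by a forward last-wins accumulator fold,
-- and computes the basename by slicing after rfind('/') instead of rsplit('/', 1)[-1].

-- ===== PORT A =====
-- value.rsplit("/", 1)[-1], ported by hand (PySem has no rsplit): Python's s.rsplit("/", 1)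
-- is [s] when "/" is absent, else [s[:i], s[i+1:]] with i = s.rfind("/"); [-1] takes the last
-- piece. Exact for this single-character separator.
def pvRsplit1Last (value : String) : String :=
  let i := PySem.Str.rfind value "/"
  if i = -1 then value else PySem.Str.slice value (some (i + 1)) none

-- the two statements of A's loop body computing `name`
def pvCleanA (value : String) : String :=
  let name := PySem.Str.strip (pvRsplit1Last value)        -- name = value.rsplit("/", 1)[-1].strip()
  if PySem.Str.endswith name ".json" then PySem.Str.slice name none (some (-5)) else name  -- name = name[:-5]

-- for value in reversed(recovery_points): … return name / fall through
def latest_recovery_id_go : List String → Option String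
  | [] => none
  | value :: rest =>
      let name := pvCleanA value
      if name ≠ "" then some name else latest_recovery_id_go rest

def latest_recovery_id (recovery_points : List String) : Option String :=
  latest_recovery_id_go recovery_points.reverse

-- ===== PORT B =====
-- name = value[value.rfind("/") + 1:].strip(); drop a trailing ".json" (len(".json") = 5)
def pvCleanB (value : String) : String :=
  let name := PySem.Str.strip (PySem.Str.slice value (some (PySem.Str.rfind value "/" + 1)) none)
  if PySem.Str.endswith name ".json" then PySem.Str.slice name none (some (-5)) else name

def latest_recovery_id_alt (recovery_points : List String) : Option String :=
  recovery_points.foldl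
    (fun result value =>
      let name := pvCleanB value
      if name ≠ "" then some name else result)
    none

-- ===== PRECONDITION & SPEC =====
def Spec_latest_recovery_id (recovery_points : List String) (out : Option String) : Prop := out = latest_recovery_id_alt recovery_points
instance (recovery_points : List String) (out : Option String) : Decidable (Spec_latest_recovery_id recovery_points out) := by unfold Spec_latest_recovery_id; infer_instance

-- ===== CLAIM (what is proved, stated in full; the proofs are below) =====
def Claim_equal_latest_recovery_id : Prop := ∀ (recovery_points : List String), Dom_latest_recovery_id recovery_points → Spec_latest_recovery_id recovery_points (latest_recovery_id recovery_points)

-- ===== LEMMAS AND PROOFS =====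

-- the two basename computations agree: on a miss rfind gives -1, and slicing from -1 + 1 = 0 keeps the whole string
lemma clean_eq (value : String) : pvCleanA value = pvCleanB value := by
  unfold pvCleanA pvCleanB pvRsplit1Last
  by_cases h : PySem.Str.rfind value "/" = -1
  · have h0 : PySem.Str.slice value (some (-1 + 1)) none = value := by
      norm_num
      exact String.toList_inj.mp (by simp [PySem.Str.toList_slice])
    simp only [h, ite_true, h0]
  · simp only [if_neg h]

lemma go_append (ys : List String) (x : String) :
    latest_recovery_id_go (ys ++ [x]) =
      match latest_recovery_id_go ys with
      | some n => some n
      | none => latest_recovery_id_go [x] := by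
  induction ys with
  | nil => simp [latest_recovery_id_go]
  | cons y ys ih =>
      by_cases h : pvCleanA y = "" <;>
        simp [latest_recovery_id_go, h, ih]

lemma foldl_eq (l : List String) (acc : Option String) :
    l.foldl (fun result value =>
        let name := pvCleanB value
        if name ≠ "" then some name else result) acc
    = match latest_recovery_id_go l.reverse with
      | some n => some n
      | none => acc := by
  induction l generalizing acc with
  | nil => simp [latest_recovery_id_go]
  | cons x xs ih =>
      simp only [List.foldl_cons, List.reverse_cons, ih, go_append]
      simp only [latest_recovery_id_go, ← clean_eq x]
      by_cases h : pvCleanA x = "" <;>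
        cases hg : latest_recovery_id_go xs.reverse <;> simp [h]

-- ===== VERDICT (by name: the statement is the Claim_ definition above) =====
theorem latest_recovery_id_spec : Claim_equal_latest_recovery_id := by
  intro rps _
  unfold Spec_latest_recovery_id latest_recovery_id latest_recovery_id_alt
  rw [foldl_eq]
  cases latest_recovery_id_go rps.reverse <;> rfl
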